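-- pv_equiv track=rewrite | github.com/shubham264693/project | proga.py | replace_consonants
-- ===== SOURCE A (Python) =====
-- def replace_consonants(plist):
--     consonants="bcdfghjklmnopqrstuvwxyz"
--     newtlist=[]
--     for word1 in plist:
--         for char in word1:
--             if char in consonants:
--                 word1=word1.replace(char,'#')
--         newtlist.append(word1)
--     return newtlist
-- ===== SOURCE B (Python) =====
-- _TABLE = str.maketrans("bcdfghjklmnopqrstuvwxyz", "#" * 23)
--
--
-- def replace_consonants(plist):
--     return [word.translate(_TABLE) for word in plist]
-- ===== Notes on version B (the rewrite author's own statement) =====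
-- stated objective: idiomatic
-- what changed: B builds one translation table up front and translates each word in a single table-driven pass, instead of A's per-character loop that calls a fresh full-string replace() for every consonant occurrence.
import Mathlib
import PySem

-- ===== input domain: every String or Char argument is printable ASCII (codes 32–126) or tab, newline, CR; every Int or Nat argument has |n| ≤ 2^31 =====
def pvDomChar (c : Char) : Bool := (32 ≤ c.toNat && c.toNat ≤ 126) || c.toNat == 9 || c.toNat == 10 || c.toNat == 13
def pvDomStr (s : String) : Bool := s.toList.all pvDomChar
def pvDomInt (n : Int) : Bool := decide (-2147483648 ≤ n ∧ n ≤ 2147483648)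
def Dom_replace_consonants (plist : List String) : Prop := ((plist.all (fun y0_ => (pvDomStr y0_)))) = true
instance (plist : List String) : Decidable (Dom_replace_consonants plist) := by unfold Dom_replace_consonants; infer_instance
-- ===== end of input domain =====

-- B replaces A's per-character membership loop with full-string replace() by a single
-- table-driven translation pass per word (idiomatic str.translate); return values agree on all inputs.


-- ===== PORT A =====
-- consonants = "bcdfghjklmnopqrstuvwxyz"
def consonantsA : String := "bcdfghjklmnopqrstuvwxyz"

-- inner loop: for char in word1 (iterates the ORIGINAL string): if char in consonants: word1 = word1.replace(char, '#')
def replaceWordA (word1 : String) : String :=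
  word1.toList.foldl
    (fun w c =>
      if PySem.Str.isIn (String.ofList [c]) consonantsA then PySem.Str.replace w (String.ofList [c]) (String.ofList ['#'])
      else w)
    word1

def replace_consonants (plist : List String) : List String :=
  plist.foldl (fun newtlist word1 => newtlist ++ [replaceWordA word1]) []

-- ===== PORT B =====
-- the translation table maps exactly the 23 lowercase consonants to '#'; translate applies it per char
def transB (c : Char) : Char :=
  if c ∈ "bcdfghjklmnopqrstuvwxyz".toList then '#' else c

def replace_consonants_alt (plist : List String) : List String :=
  plist.map (fun word => String.ofList (word.toList.map transB))

-- ===== PRECONDITION & SPEC =====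
def Spec_replace_consonants (plist : List String) (out : List String) : Prop := out = replace_consonants_alt plist
instance (plist : List String) (out : List String) : Decidable (Spec_replace_consonants plist out) := by unfold Spec_replace_consonants; infer_instance

-- ===== CLAIM (what is proved, stated in full; the proofs are below) =====
def Claim_equal_replace_consonants : Prop := ∀ (plist : List String), Dom_replace_consonants plist → Spec_replace_consonants plist (replace_consonants plist)

-- ===== LEMMAS AND PROOFS =====

-- single-char substring search is just membership
theorem findGo_single (c : Char) (cs : List Char) (k : Nat) :
    (PySem.Chars.find.go [c] cs k != -1) = cs.contains c := by
  induction cs generalizing k with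
  | nil => simp [PySem.Chars.find.go, List.isEmpty]
  | cons h t ih =>
    by_cases hc : c = h
    · subst hc
      simp [PySem.Chars.find.go, List.isPrefixOf]
    · have h1 : (c == h) = false := by simpa using hc
      simp [PySem.Chars.find.go, List.isPrefixOf, h1, ih]
      exact fun h' => absurd h' hc

theorem isIn_single (c : Char) (cs : List Char) :
    PySem.Chars.isIn [c] cs = cs.contains c := by
  simpa [PySem.Chars.isIn, PySem.Chars.find] using findGo_single c cs 0

-- single-char replace is a pointwise map
theorem replaceGo_single (c r : Char) (fuel : Nat) (s acc : List Char) (h : s.length ≤ fuel) :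
    PySem.Chars.replace.go [c] [r] fuel s acc
      = acc.reverse ++ s.map (fun x => if x = c then r else x) := by
  induction fuel generalizing s acc with
  | zero =>
    have : s = [] := List.length_eq_zero_iff.mp (Nat.le_zero.mp h)
    subst this
    simp [PySem.Chars.replace.go]
  | succ n ih =>
    cases s with
    | nil => simp [PySem.Chars.replace.go]
    | cons a t =>
      have ht : t.length ≤ n := by simpa using h
      by_cases hc : c = a
      · subst hc
        simp [PySem.Chars.replace.go, List.isPrefixOf, ih t (r :: acc) ht]
      · have h1 : (c == a) = false := by simpa using hc
        have h2 : ¬ a = c := Ne.symm hc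
        simp [PySem.Chars.replace.go, List.isPrefixOf, h1, h2, ih t (a :: acc) ht]

theorem replace_single (c r : Char) (s : List Char) :
    PySem.Chars.replace s [c] [r] = s.map (fun x => if x = c then r else x) := by
  simp only [PySem.Chars.replace, List.isEmpty]
  rw [replaceGo_single c r s.length s [] (le_refl _)]
  simp

-- one step of A's inner loop, on char lists
def stepA (w : List Char) (c : Char) : List Char :=
  if PySem.Chars.isIn [c] consonantsA.toList then
    PySem.Chars.replace w [c] ['#']
  else w

theorem foldA_chars (L s : List Char) :
    L.foldl stepA s
      = s.map (fun x => if x ∈ L ∧ x ∈ consonantsA.toList then '#' else x) := by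
  induction L generalizing s with
  | nil => simp
  | cons c L ih =>
    simp only [List.foldl_cons, stepA, isIn_single]
    by_cases hc : c ∈ consonantsA.toList
    · rw [if_pos (by simpa using hc), replace_single, ih, List.map_map]
      apply List.map_congr_left
      intro x _
      simp only [Function.comp]
      by_cases hx : x = c
      · subst hx
        simp [hc, show ('#' : Char) ∉ consonantsA.toList by decide]
      · simp only [if_neg hx]
        by_cases hcons : x ∈ consonantsA.toList
        · simp [hcons, List.mem_cons, hx]
        · simp [hcons]
    · rw [if_neg (by simpa using hc), ih]
      apply List.map_congr_left
      intro x _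
      by_cases hcons : x ∈ consonantsA.toList
      · have hx : ¬ x = c := fun h' => hc (h' ▸ hcons)
        simp [hcons, List.mem_cons, hx]
      · simp [hcons]

theorem replaceWordA_eq (w : String) :
    replaceWordA w = String.ofList (w.toList.map transB) := by
  have hfold : ∀ (L : List Char) (s : String),
      (L.foldl (fun w c =>
        if PySem.Str.isIn (String.ofList [c]) consonantsA then
          PySem.Str.replace w (String.ofList [c]) (String.ofList ['#'])
        else w) s).toList = L.foldl stepA s.toList := by
    intro L
    induction L with
    | nil => intro s; rfl
    | cons c L ih =>
      intro s
      simp only [List.foldl_cons, stepA]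
      rw [ih]
      congr 1
      by_cases hin : PySem.Chars.isIn [c] consonantsA.toList
      · rw [if_pos (by simpa [PySem.Str.isIn_eq, String.toList_ofList] using hin), if_pos hin]
        simp [PySem.Str.toList_replace, String.toList_ofList]
      · rw [if_neg (by simpa [PySem.Str.isIn_eq, String.toList_ofList] using hin), if_neg hin]
  have h : (replaceWordA w).toList = w.toList.map transB := by
    rw [replaceWordA, hfold, foldA_chars]
    apply List.map_congr_left
    intro x hx
    simp [transB, hx, consonantsA]
  calc replaceWordA w = String.ofList (replaceWordA w).toList := by simp
    _ = String.ofList (w.toList.map transB) := by rw [h]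

theorem foldl_append_map (plist acc : List String) :
    plist.foldl (fun newtlist word1 => newtlist ++ [replaceWordA word1]) acc
      = acc ++ plist.map replaceWordA := by
  induction plist generalizing acc with
  | nil => simp
  | cons w t ih => simp [ih, List.append_assoc]

-- ===== VERDICT (by name: the statement is the Claim_ definition above) =====
theorem replace_consonants_spec : Claim_equal_replace_consonants := by
  intro plist _
  unfold Spec_replace_consonants replace_consonants replace_consonants_alt
  rw [foldl_append_map]
  simp only [List.nil_append]
  exact List.map_congr_left (fun w _ => replaceWordA_eq w)
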